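-- pv_equiv track=rewrite | github.com/jmgimeno/aoc2018 | day5/day5.py | reaction_step
-- ===== SOURCE A (Python) =====
-- def reacts(mer1, mer2):
--     return mer1.islower() != mer2.islower() and mer1.lower() == mer2.lower()
--
-- def reaction_step(polymer):
--     to_remove = set()
--     idx = 0
--     while idx < len(polymer) - 1:
--         if reacts(polymer[idx], polymer[idx+1]):
--             to_remove.update({idx, idx+1})
--             idx += 1
--         idx += 1
--     return "".join(mer for (idx, mer) in enumerate(polymer) if idx not in to_remove)
-- ===== SOURCE B (Python) =====
-- def reacts(mer1, mer2):
--     return mer1.islower() != mer2.islower() and mer1.lower() == mer2.lower()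
--
-- def reaction_step(polymer):
--     # Segment the string into maximal "reacting chains" (runs where every
--     # adjacent pair reacts).  A's greedy pair-skipping removes pairs from the
--     # left of each chain, so a chain survives as its last character iff its
--     # length is odd; chars between chains are chains of length 1 and are kept.
--     n = len(polymer)
--     out = []
--     start = 0
--     while start < n:
--         end = start
--         while end + 1 < n and reacts(polymer[end], polymer[end + 1]):
--             end += 1
--         if (end - start + 1) % 2 == 1:
--             out.append(polymer[end])
--         start = end + 1
--     return "".join(out)
-- ===== Notes on version B (the rewrite author's own statement) =====
-- stated objective: alternative
-- what changed: Replaces A's pair-skipping simulation with removed-index set plus second filtering pass by a chain-decomposition: split the string into maximal runs where every adjacent pair reacts and keep each run's last character iff the run length is odd (a per-chain parity closed form), no index set, no filtering pass.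
import Mathlib
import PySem

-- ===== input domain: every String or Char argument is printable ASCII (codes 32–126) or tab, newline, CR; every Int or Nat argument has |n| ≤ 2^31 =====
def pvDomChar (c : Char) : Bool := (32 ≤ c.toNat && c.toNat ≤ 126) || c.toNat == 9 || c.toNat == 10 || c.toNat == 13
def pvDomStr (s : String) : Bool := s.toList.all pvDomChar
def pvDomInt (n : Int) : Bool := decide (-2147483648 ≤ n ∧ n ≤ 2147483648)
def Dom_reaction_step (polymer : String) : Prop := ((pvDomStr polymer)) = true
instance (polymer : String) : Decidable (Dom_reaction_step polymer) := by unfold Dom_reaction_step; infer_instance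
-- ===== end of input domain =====

-- B replaces A's mark-then-filter pair skipping by a chain decomposition: maximal reacting
-- runs, keeping each run's last character iff the run length is odd; objective: alternative.

-- ===== PORT A =====
-- reacts(mer1, mer2) on one-character strings: char-level islower / lower
def pvReacts (mer1 mer2 : Char) : Bool :=
  (PySem.Chars.islower mer1 != PySem.Chars.islower mer2) &&
  (PySem.Chars.lowerChar mer1 == PySem.Chars.lowerChar mer2)

-- the while loop: accumulates to_remove (a Python set of ints)
def pvALoop (cs : List Char) (idx : Nat) (rem : PySem.Set Int) : PySem.Set Int :=
  if h : idx < cs.length - 1 then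
    if pvReacts (cs[idx]'(by omega)) (cs[idx+1]'(by omega)) then
      pvALoop cs (idx + 2) (PySem.Set.update rem [(idx : Int), ((idx : Int) + 1)])
    else
      pvALoop cs (idx + 1) rem
  else rem
termination_by cs.length - idx

def reaction_step (polymer : String) : String :=
  let cs := polymer.toList
  let to_remove := pvALoop cs 0 PySem.Set.empty
  String.ofList (((PySem.List.enumerate cs).filter
      (fun p => !(PySem.Set.contains to_remove p.1))).map (·.2))

-- ===== PORT B =====
-- Source B's inner while: extend 'end' while the next adjacent pair reacts
def pvChainEnd (cs : List Char) (e : Nat) : Nat :=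
  if h : e + 1 < cs.length then
    if pvReacts (cs[e]'(by omega)) (cs[e+1]'h) then pvChainEnd cs (e+1) else e
  else e
termination_by cs.length - e

-- needed by pvBOuter's termination proof
lemma pvChainEnd_ge (cs : List Char) (e : Nat) : e ≤ pvChainEnd cs e := by
  fun_induction pvChainEnd cs e with
  | case1 e h hr ih => omega
  | case2 e h hr => omega
  | case3 e h => omega

-- Source B's outer while: per chain, keep the last char iff the chain length is odd
def pvBOuter (cs : List Char) (start : Nat) (out : List Char) : List Char :=
  if _h : start < cs.length then
    let e := pvChainEnd cs start
    pvBOuter cs (e + 1) (if (e - start + 1) % 2 == 1 then out ++ [cs.getD e ' '] else out)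
  else out
termination_by cs.length - start
decreasing_by have := pvChainEnd_ge cs start; omega

def reaction_step_alt (polymer : String) : String :=
  String.ofList (pvBOuter polymer.toList 0 [])

-- ===== PRECONDITION & SPEC =====
def Spec_reaction_step (polymer : String) (out : String) : Prop := out = reaction_step_alt polymer
instance (polymer : String) (out : String) : Decidable (Spec_reaction_step polymer out) := by unfold Spec_reaction_step; infer_instance

-- ===== CLAIM (what is proved, stated in full; the proofs are below) =====
def Claim_equal_reaction_step : Prop := ∀ (polymer : String), Dom_reaction_step polymer → Spec_reaction_step polymer (reaction_step polymer)

-- ===== LEMMAS AND PROOFS =====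

-- proof-internal middle form: the skip-two recursion both ports are related to
def pvBCore : List Char → List Char
  | a :: b :: rest => if pvReacts a b then pvBCore rest else a :: pvBCore (b :: rest)
  | [a] => [a]
  | [] => []

lemma pvALoop_mono (cs : List Char) (idx : Nat) (rem : PySem.Set Int) (j : Int)
    (hj : j ∈ rem) : j ∈ pvALoop cs idx rem := by
  fun_induction pvALoop cs idx rem with
  | case1 idx rem h hr ih => exact ih (by simp [PySem.Set.update, PySem.Set.mem_add]; tauto)
  | case2 idx rem h hr ih => exact ih hj
  | case3 idx rem h => exact hj

lemma pvALoop_bound (cs : List Char) (idx : Nat) (rem : PySem.Set Int) (j : Int)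
    (hj : j ∈ pvALoop cs idx rem) : j ∈ rem ∨ (idx : Int) ≤ j := by
  fun_induction pvALoop cs idx rem with
  | case1 idx rem h hr ih =>
    rcases ih hj with h' | h'
    · simp [PySem.Set.update, PySem.Set.mem_add] at h'
      rcases h' with (h' | h') | h'
      · exact Or.inl h'
      · right; omega
      · right; omega
    · right; push_cast at h' ⊢; omega
  | case2 idx rem h hr ih =>
    rcases ih hj with h' | h'
    · exact Or.inl h'
    · right; push_cast at h' ⊢; omega
  | case3 idx rem h => exact Or.inl hj

lemma pv_contains_iff (s : PySem.Set Int) (j : Int) :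
    PySem.Set.contains s j = true ↔ j ∈ s := by
  unfold PySem.Set.contains
  exact List.contains_iff_mem

-- A's filtered enumeration equals the skip-two middle form
lemma pvMain (cs : List Char) (idx : Nat) (rem : PySem.Set Int)
    (hrem : ∀ j ∈ rem, j < (idx : Int)) :
    ((PySem.List.enumerate (cs.drop idx) idx).filter
        (fun p => !(PySem.Set.contains (pvALoop cs idx rem) p.1))).map (·.2)
      = pvBCore (cs.drop idx) := by
  fun_induction pvALoop cs idx rem with
  | case1 idx rem h hr ih =>
    have h1 : idx < cs.length := by omega
    have h2 : idx + 1 < cs.length := by omega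
    have hd : cs.drop idx = cs[idx] :: cs[idx+1] :: cs.drop (idx+2) := by
      rw [List.drop_eq_getElem_cons h1, List.drop_eq_getElem_cons h2]
    rw [hd]
    simp only [PySem.List.enumerate_cons, List.filter_cons]
    have hin : ((idx : Int)) ∈ pvALoop cs (idx + 2) (PySem.Set.update rem [(idx : Int), ((idx : Int) + 1)]) := by
      apply pvALoop_mono
      simp [PySem.Set.update, PySem.Set.mem_add]
    have hin1 : ((idx : Int) + 1) ∈ pvALoop cs (idx + 2) (PySem.Set.update rem [(idx : Int), ((idx : Int) + 1)]) := by
      apply pvALoop_mono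
      simp [PySem.Set.update, PySem.Set.mem_add]
    rw [(pv_contains_iff _ _).2 hin]
    simp only [Bool.not_true, Bool.false_eq_true, if_false]
    rw [(pv_contains_iff _ _).2 hin1]
    simp only [Bool.not_true, Bool.false_eq_true, if_false]
    have harith : (idx : Int) + 1 + 1 = ((idx + 2 : Nat) : Int) := by push_cast; ring
    rw [harith, ih ?_]
    · simp [pvBCore, hr]
    · intro j hj
      simp [PySem.Set.update, PySem.Set.mem_add] at hj
      rcases hj with (hj | hj) | hj
      · have := hrem j hj; push_cast; omega
      · push_cast; omega
      · push_cast; omega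
  | case2 idx rem h hr ih =>
    have h1 : idx < cs.length := by omega
    have h2 : idx + 1 < cs.length := by omega
    have hd' : cs.drop idx = cs[idx] :: cs.drop (idx+1) := List.drop_eq_getElem_cons h1
    have hd1 : cs.drop (idx+1) = cs[idx+1] :: cs.drop (idx+2) := by
      rw [List.drop_eq_getElem_cons h2]
    rw [hd', PySem.List.enumerate_cons, List.filter_cons]
    have hout : ((idx : Int)) ∉ pvALoop cs (idx + 1) rem := by
      intro hj
      rcases pvALoop_bound cs (idx+1) rem _ hj with h' | h'
      · have := hrem _ h'; omega
      · push_cast at h'; omega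
    have hc : PySem.Set.contains (pvALoop cs (idx + 1) rem) ((idx : Int)) = false := by
      rw [← Bool.not_eq_true, pv_contains_iff]; exact hout
    rw [hc]
    simp only [Bool.not_false, if_true, List.map_cons]
    have harith : (idx : Int) + 1 = ((idx + 1 : Nat) : Int) := by push_cast; ring
    rw [harith, ih (by intro j hj; have := hrem j hj; push_cast; omega), hd1]
    simp [pvBCore, hr]
  | case3 idx rem h =>
    by_cases hlen : idx < cs.length
    · have hlen2 : cs.length ≤ idx + 1 := by omega
      have hd : cs.drop idx = [cs[idx]] := by
        rw [List.drop_eq_getElem_cons hlen, List.drop_eq_nil_of_le hlen2]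
      rw [hd]
      simp only [PySem.List.enumerate_cons, PySem.List.enumerate_nil, List.filter_cons,
        List.filter_nil]
      have hout : ((idx : Int)) ∉ rem := by intro hj; have := hrem _ hj; omega
      have hc : PySem.Set.contains rem ((idx : Int)) = false := by
        rw [← Bool.not_eq_true, pv_contains_iff]; exact hout
      rw [hc]
      simp [pvBCore]
    · rw [List.drop_eq_nil_of_le (by omega)]
      simp [pvBCore, PySem.List.enumerate_nil]

-- per-chain parity characterisation of the skip-two middle form
lemma pvChain_lemma (k : Nat) : ∀ (cs : List Char) (start : Nat),
    cs.length - start ≤ k → start < cs.length →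
    pvBCore (cs.drop start) =
      (if (pvChainEnd cs start - start + 1) % 2 == 1 then [cs.getD (pvChainEnd cs start) ' '] else [])
        ++ pvBCore (cs.drop (pvChainEnd cs start + 1)) := by
  induction k with
  | zero => intro cs start hk h; omega
  | succ k ih =>
    intro cs start hk h
    by_cases h1 : start + 1 < cs.length
    · by_cases hr : pvReacts (cs[start]'(by omega)) (cs[start+1]'h1) = true
      · -- the pair at 'start' reacts: chain extends
        have he : pvChainEnd cs start = pvChainEnd cs (start + 1) := by
          rw [pvChainEnd]; simp [h1, hr]
        have hd : cs.drop start = cs[start] :: cs[start+1] :: cs.drop (start+2) := by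
          rw [List.drop_eq_getElem_cons h, List.drop_eq_getElem_cons h1]
        by_cases h2 : start + 2 < cs.length
        · by_cases hr2 : pvReacts (cs[start+1]'h1) (cs[start+2]'h2) = true
          · -- chain continues past start+1: use IH at start+2
            have he2 : pvChainEnd cs (start + 1) = pvChainEnd cs (start + 2) := by
              rw [pvChainEnd]; simp [h2, hr2]
            have hge : start + 2 ≤ pvChainEnd cs (start + 2) := pvChainEnd_ge cs (start + 2)
            have := ih cs (start + 2) (by omega) h2
            rw [hd]
            simp only [pvBCore, hr, if_true]
            rw [this, he, he2]
            congr 1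
            have hpar : (pvChainEnd cs (start + 2) - (start + 2) + 1) % 2
                = (pvChainEnd cs (start + 2) - start + 1) % 2 := by omega
            rw [hpar]
          · -- chain ends at start+1 (even length 2 here? no: length = e-start+1 with e=start+1)
            have he2 : pvChainEnd cs (start + 1) = start + 1 := by
              rw [pvChainEnd]; simp [h2, hr2]
            rw [hd, he, he2]
            simp only [pvBCore, hr, if_true]
            simp
        · -- start+2 ≥ length: chain is exactly the reacting pair
          have he2 : pvChainEnd cs (start + 1) = start + 1 := by
            rw [pvChainEnd]; rw [dif_neg (by omega)]
          rw [hd, he, he2]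
          simp only [pvBCore, hr, if_true]
          have hnil : cs.drop (start + 2) = [] := List.drop_eq_nil_of_le (by omega)
          simp [hnil, pvBCore]
      · -- pair at start does not react: chain of length 1
        have he : pvChainEnd cs start = start := by
          rw [pvChainEnd]; simp [h1, hr]
        have hd : cs.drop start = cs[start] :: cs.drop (start+1) := List.drop_eq_getElem_cons h
        have hd1 : cs.drop (start+1) = cs[start+1] :: cs.drop (start+2) := List.drop_eq_getElem_cons h1
        rw [he, hd, hd1]
        simp only [pvBCore, hr]
        have hg : cs[start]? = some cs[start] := List.getElem?_eq_getElem h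
        simp [hg]
    · -- start is the last index: chain of length 1, rest empty
      have he : pvChainEnd cs start = start := by
        rw [pvChainEnd]; rw [dif_neg (by omega)]
      have hd : cs.drop start = [cs[start]] := by
        rw [List.drop_eq_getElem_cons h, List.drop_eq_nil_of_le (by omega)]
      have hnil : cs.drop (start + 1) = [] := List.drop_eq_nil_of_le (by omega)
      rw [he, hd, hnil]
      have hg : cs[start]? = some cs[start] := List.getElem?_eq_getElem h
      simp [pvBCore, hg]

lemma pvBOuter_eq (cs : List Char) (start : Nat) (out : List Char) :
    pvBOuter cs start out = out ++ pvBCore (cs.drop start) := by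
  fun_induction pvBOuter cs start out with
  | case1 start out h e ih =>
    simp only [dite_eq_ite] at ih
    rw [ih, pvChain_lemma (cs.length - start) cs start (by omega) h]
    split <;> simp <;> first | exact ⟨rfl, rfl⟩ | rfl
  | case2 start out h =>
    rw [List.drop_eq_nil_of_le (by omega)]
    simp [pvBCore]

-- ===== VERDICT (by name: the statement is the Claim_ definition above) =====
theorem reaction_step_spec : Claim_equal_reaction_step := by
  intro polymer _
  unfold Spec_reaction_step reaction_step reaction_step_alt
  have h := pvMain polymer.toList 0 PySem.Set.empty (by intro j hj; simp [PySem.Set.empty] at hj)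
  simp only [List.drop_zero] at h
  rw [pvBOuter_eq]
  simp only [List.nil_append, List.drop_zero]
  rw [← h]
  rfl
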